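-- pv_equiv track=rewrite | github.com/lucasn/farm-on-edge-studies | FederatedFogSimulation/gateway/gateway.py | calculate_benefits
-- ===== SOURCE A (Python) =====
-- def calculate_benefits(requests: list, fogs_latency: list, fogs_uplink: list):
--     benefits = []
--     fogs_number = len(fogs_uplink)
--
--     assert fogs_number == len(fogs_latency)
--
--     for request in requests:
--         actual_request_benefits = []
--         for fog_index in range(fogs_number):
--             latency_benefit = request[0] - int(fogs_latency[fog_index])
--             uplink_benefit = int(fogs_uplink[fog_index]) - request[1]
--             actual_request_benefits.append(latency_benefit + uplink_benefit)
--         benefits.append(actual_request_benefits)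
--
--     return adjust_benefits(benefits)
--
-- def adjust_benefits(benefits: list):
--     min_value = 0
--     for line in benefits:
--         for value in line:
--             if value < min_value:
--                 min_value = value
--
--     if min_value != 0:
--         for i, line in enumerate(benefits):
--             for j, value in enumerate(line):
--                 benefits[i][j] += abs(min_value)
--
--     return benefits
-- ===== SOURCE B (Python) =====
-- def calculate_benefits(requests: list, fogs_latency: list, fogs_uplink: list):
--     assert len(fogs_uplink) == len(fogs_latency)
--
--     # benefit[i][j] = (req[0]-req[1]) + (uplink[j]-latency[j]) is separable
--     fog_consts = [int(u) - int(l) for u, l in zip(fogs_uplink, fogs_latency)]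
--     if not fog_consts:
--         return [[] for _ in requests]
--
--     req_consts = [r[0] - r[1] for r in requests]
--     shift = 0
--     if req_consts:
--         overall_min = min(req_consts) + min(fog_consts)
--         if overall_min < 0:
--             shift = -overall_min
--
--     return [[rc + fc + shift for fc in fog_consts] for rc in req_consts]
-- ===== Notes on version B (the rewrite author's own statement) =====
-- stated objective: faster
-- what changed: Uses separability benefit[i][j] = (req[0]-req[1]) + (uplink[j]-latency[j]): precomputes per-request and per-fog constants, obtains the global minimum as min(req_consts)+min(fog_consts) in O(n+m) instead of A's full second scan over the built matrix, and emits the already-shifted matrix in one comprehension instead of A's build-then-mutate passes.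
import Mathlib
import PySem

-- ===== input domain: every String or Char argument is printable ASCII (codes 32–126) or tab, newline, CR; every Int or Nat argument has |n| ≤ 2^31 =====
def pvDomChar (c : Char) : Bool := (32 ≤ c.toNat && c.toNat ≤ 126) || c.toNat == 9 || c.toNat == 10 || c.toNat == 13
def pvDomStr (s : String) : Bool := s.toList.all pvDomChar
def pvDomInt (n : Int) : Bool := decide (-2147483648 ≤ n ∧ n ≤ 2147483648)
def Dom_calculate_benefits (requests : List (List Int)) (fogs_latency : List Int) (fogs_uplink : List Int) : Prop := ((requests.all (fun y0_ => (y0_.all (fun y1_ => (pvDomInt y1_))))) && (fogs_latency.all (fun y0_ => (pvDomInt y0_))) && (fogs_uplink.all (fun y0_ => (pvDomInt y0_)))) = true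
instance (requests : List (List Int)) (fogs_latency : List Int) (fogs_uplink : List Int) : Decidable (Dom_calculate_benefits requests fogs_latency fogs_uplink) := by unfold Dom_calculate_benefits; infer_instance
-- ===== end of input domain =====

-- ===== PORT A =====
-- B replaces A's full matrix scan for the minimum by separable per-row/per-fog minima (alternative decomposition, same output).
-- helper: port of A's adjust_benefits (mutation of the local list ported as a rebuild; no argument is mutated)
def pyAdjustBenefits (benefits : List (List Int)) : List (List Int) :=
  let min_value := benefits.foldl (fun m line => line.foldl (fun m v => if v < m then v else m) m) 0
  if min_value ≠ 0 then
    benefits.map (fun line => line.map (fun v => v + |min_value|))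
  else benefits

def calculate_benefits (requests : List (List Int)) (fogs_latency : List Int) (fogs_uplink : List Int) : List (List Int) :=
  let fogs_number := fogs_uplink.length
  let benefits := requests.foldl (fun acc request =>
    acc ++ [(List.range fogs_number).foldl (fun row j =>
      row ++ [(request.getD 0 0 - fogs_latency.getD j 0) + (fogs_uplink.getD j 0 - request.getD 1 0)]) []]) []
  pyAdjustBenefits benefits

-- ===== PORT B =====
def calculate_benefits_alt (requests : List (List Int)) (fogs_latency : List Int) (fogs_uplink : List Int) : List (List Int) :=
  let fog_consts := (fogs_uplink.zip fogs_latency).map (fun p => p.1 - p.2)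
  if fog_consts = [] then requests.map (fun _ => ([] : List Int))
  else
    let req_consts := requests.map (fun r => r.getD 0 0 - r.getD 1 0)
    let shift :=
      match PySem.List.min? req_consts (fun x => x), PySem.List.min? fog_consts (fun x => x) with
      | some mr, some mf => if mr + mf < 0 then -(mr + mf) else 0
      | _, _ => 0
    req_consts.map (fun rc => fog_consts.map (fun fc => rc + fc + shift))

-- ===== PRECONDITION & SPEC =====
-- Pre_ excludes exactly the inputs where Python A raises: a failed assert (length mismatch),
-- or a request with fewer than 2 entries indexed when there is at least one fog.
def Pre_calculate_benefits (requests : List (List Int)) (fogs_latency : List Int) (fogs_uplink : List Int) : Prop :=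
  fogs_uplink.length = fogs_latency.length ∧
  (fogs_uplink = [] ∨ ∀ r ∈ requests, 2 ≤ r.length)
instance (requests : List (List Int)) (fogs_latency : List Int) (fogs_uplink : List Int) : Decidable (Pre_calculate_benefits requests fogs_latency fogs_uplink) := by unfold Pre_calculate_benefits; infer_instance
def pvWitness_calculate_benefits : List (List Int) × List Int × List Int := ([[1, 2], [5, -3]], [1, 4], [3, 2])

def Spec_calculate_benefits (requests : List (List Int)) (fogs_latency : List Int) (fogs_uplink : List Int) (out : List (List Int)) : Prop := out = calculate_benefits_alt requests fogs_latency fogs_uplink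
instance (requests : List (List Int)) (fogs_latency : List Int) (fogs_uplink : List Int) (out : List (List Int)) : Decidable (Spec_calculate_benefits requests fogs_latency fogs_uplink out) := by unfold Spec_calculate_benefits; infer_instance

-- ===== CLAIM (what is proved, stated in full; the proofs are below) =====
def Claim_equal_calculate_benefits : Prop := ∀ (requests : List (List Int)) (fogs_latency : List Int) (fogs_uplink : List Int), Dom_calculate_benefits requests fogs_latency fogs_uplink → Pre_calculate_benefits requests fogs_latency fogs_uplink → Spec_calculate_benefits requests fogs_latency fogs_uplink (calculate_benefits requests fogs_latency fogs_uplink)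

-- ===== LEMMAS AND PROOFS =====

theorem pvFoldlAppendMap {a b : Type} (f : a -> b) (l : List a) (acc : List b) :
    l.foldl (fun s x => s ++ [f x]) acc = acc ++ l.map f := by
  induction l generalizing acc with
  | nil => simp
  | cons x t ih => simp [List.foldl, ih]

theorem pvIfMin (m v : Int) : (if v < m then v else m) = min m v := by omega

theorem pvFoldlMinMin (t : List Int) (a b : Int) :
    t.foldl min (min a b) = min a (t.foldl min b) := by
  induction t generalizing b with
  | nil => simp
  | cons c t ih =>
    simp only [List.foldl]
    rw [min_assoc, ih]

theorem pvRowMin (t : List Int) (x m rc : Int) :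
    ((x :: t).map (fun fc => rc + fc)).foldl min m = min m (rc + t.foldl min x) := by
  induction t generalizing x m with
  | nil => simp
  | cons y t ih =>
    simp only [List.map, List.foldl] at *
    rw [ih y (min m (rc + x)), pvFoldlMinMin, ← min_add_add_left, min_assoc]

theorem pvOuterMin (R : List Int) (F : List Int) (c : Int) (a : Int)
    (h : ∀ m rc, (F.map (fun fc => rc + fc)).foldl min m = min m (rc + c)) :
    (R.map (fun rc => F.map (fun fc => rc + fc))).foldl (fun m line => line.foldl min m) a
      = R.foldl (fun m rc => min m (rc + c)) a := by
  induction R generalizing a with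
  | nil => simp
  | cons r R ih => simp only [List.map, List.foldl, h, ih]

theorem pvReqMin (t : List Int) (x a c : Int) :
    (x :: t).foldl (fun m rc => min m (rc + c)) a = min a (t.foldl min x + c) := by
  induction t generalizing x a with
  | nil => simp
  | cons y t ih =>
    simp only [List.foldl] at *
    rw [ih y (min a (x + c)), pvFoldlMinMin, ← min_add_add_right, min_assoc]

theorem pvZipRange (u : List Int) :
    ∀ l : List Int, u.length = l.length →
    (u.zip l).map (fun p => p.1 - p.2)
      = (List.range u.length).map (fun j => u.getD j 0 - l.getD j 0) := by
  induction u with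
  | nil => intro l h; simp
  | cons a u ih =>
    intro l h
    cases l with
    | nil => simp at h
    | cons b l =>
      simp only [List.length_cons] at h
      simp only [List.zip_cons_cons, List.map, List.length_cons,
        List.range_succ_eq_map, List.map_map]
      rw [ih l (by omega)]
      simp [Function.comp]

theorem pvInnerFoldMin (L : List Int) (m : Int) :
    L.foldl (fun m v => if v < m then v else m) m = L.foldl min m := by
  simp only [pvIfMin]

theorem pvMatFoldMin (M : List (List Int)) (a : Int) :
    M.foldl (fun m line => line.foldl (fun m v => if v < m then v else m) m) a
      = M.foldl (fun m line => line.foldl min m) a := by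
  simp only [pvInnerFoldMin]

-- ===== VERDICT (by name: the statement is the Claim_ definition above) =====
theorem calculate_benefits_spec : Claim_equal_calculate_benefits := by
  intro requests fogs_latency fogs_uplink _ hpre
  obtain ⟨hlen, _⟩ := hpre
  unfold Spec_calculate_benefits calculate_benefits calculate_benefits_alt pyAdjustBenefits
  simp only
  rw [pvFoldlAppendMap, List.nil_append, pvZipRange fogs_uplink fogs_latency hlen]
  set n := fogs_uplink.length with hn
  set fc : Nat -> Int := fun j => fogs_uplink.getD j 0 - fogs_latency.getD j 0 with hfc
  set rc : List Int -> Int := fun r => r.getD 0 0 - r.getD 1 0 with hrc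
  have hrow : ∀ r : List Int, (List.range n).foldl (fun row j =>
      row ++ [(r.getD 0 0 - fogs_latency.getD j 0) + (fogs_uplink.getD j 0 - r.getD 1 0)]) []
      = (List.range n).map (fun j => rc r + fc j) := by
    intro r
    rw [pvFoldlAppendMap, List.nil_append]
    exact List.map_congr_left (fun j _ => by simp [hrc, hfc]; omega)
  simp only [hrow]
  cases hF : (List.range n).map fc with
  | nil =>
    have hn0 : n = 0 := by
      by_contra h
      have : (List.range n).map fc ≠ [] := by simp [List.range_eq_nil]; omega
      exact this hF
    simp [hn0, List.range_zero]
  | cons x t =>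
    rw [if_neg (List.cons_ne_nil x t)]
    have hmat : requests.map (fun r => (List.range n).map (fun j => rc r + fc j))
        = (requests.map rc).map (fun rcv => ((List.range n).map fc).map (fun fcv => rcv + fcv)) := by
      simp [List.map_map, Function.comp]
    have hrowmin : ∀ m rcv, (((List.range n).map fc).map (fun fcv => rcv + fcv)).foldl min m
        = min m (rcv + t.foldl min x) := by
      intro m rcv; rw [hF]; exact pvRowMin t x m rcv
    cases hR : requests.map rc with
    | nil =>
      have hreq : requests = [] := by
        cases requests with
        | nil => rfl
        | cons a b => simp at hR
      simp [hreq]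
    | cons rx rt =>
      set mr := rt.foldl min rx with hmr
      set mf := t.foldl min x with hmfv
      have hmv : (requests.map (fun r => (List.range n).map (fun j => rc r + fc j))).foldl
          (fun m line => line.foldl (fun m v => if v < m then v else m) m) 0
          = min 0 (mr + mf) := by
        rw [pvMatFoldMin, hmat, pvOuterMin (requests.map rc) ((List.range n).map fc) mf 0 hrowmin,
          hR, pvReqMin rt rx 0 mf]
      rw [hmv, PySem.List.min?_id_cons, PySem.List.min?_id_cons, ← hmr, ← hmfv, ← hF]
      simp only []
      by_cases hneg : mr + mf < 0
      · rw [if_pos (by omega : ¬ min 0 (mr + mf) = 0), if_pos hneg]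
        have habs : |min 0 (mr + mf)| = -(mr + mf) := by
          rw [min_eq_right (by omega : mr + mf ≤ (0:Int)), abs_of_nonpos (by omega)]
        rw [habs, hmat, ← hR]
        simp [List.map_map, Function.comp]
      · rw [if_neg (by simp; omega : ¬ ¬ min 0 (mr + mf) = 0), if_neg hneg]
        rw [hmat, ← hR]
        simp
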